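-- pv_equiv track=rewrite | github.com/Kenjicci/Search-Algorithms | uninformed_search.py | dfs
-- ===== SOURCE A (Python) =====
-- letter = ["A", "B", "C", "D"]
--
-- def get_moves(node):
--     letter_index = letter.index(node)
--     moves = []
--
--     # Check if we can move +1 position
--     if letter_index + 1 < len(letter):
--         moves.append(letter[letter_index + 1])
--
--     # Check if we can move +2 positions
--     if letter_index + 2 < len(letter):
--         moves.append(letter[letter_index + 2])
--
--     return moves
--
-- def dfs(current, goal, path):
--     if current == goal:               # If we reach the goal, return the path
--         return path
--
--     moves = get_moves(current)        # Get the possible next letters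
--
--     # If no moves are possible, return None (dead end)
--     if not moves:
--         return None
--
--     # Try each possible move
--     for move in moves:
--         # Avoid revisiting letters already in our current path (prevent cycles)
--         if move not in path:
--             result = dfs(move, goal, path + [move])
--             if result:                # If a solution was found, return it
--                 return result
--
--     return None  # No solution found from this path
-- ===== SOURCE B (Python) =====
-- letter = ["A", "B", "C", "D"]
--
-- def get_moves(node):
--     letter_index = letter.index(node)
--     moves = []
--     if letter_index + 1 < len(letter):
--         moves.append(letter[letter_index + 1])
--     if letter_index + 2 < len(letter):
--         moves.append(letter[letter_index + 2])
--     return moves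
--
-- def dfs(current, goal, path):
--     # Iterative DFS with an explicit stack of (node, path) frames.
--     stack = [(current, path)]
--     while stack:
--         node, p = stack.pop()
--         if node == goal:
--             return p
--         for move in reversed(get_moves(node)):
--             if move not in p:
--                 stack.append((move, p + [move]))
--     return None
-- ===== Notes on version B (the rewrite author's own statement) =====
-- stated objective: alternative
-- what changed: Replaced the recursive DFS (with per-call for-loop over moves and truthiness check on recursive results) by an iterative DFS over an explicit stack of (node, path) frames, pushing children in reversed order to preserve the visit order.
import Mathlib
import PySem

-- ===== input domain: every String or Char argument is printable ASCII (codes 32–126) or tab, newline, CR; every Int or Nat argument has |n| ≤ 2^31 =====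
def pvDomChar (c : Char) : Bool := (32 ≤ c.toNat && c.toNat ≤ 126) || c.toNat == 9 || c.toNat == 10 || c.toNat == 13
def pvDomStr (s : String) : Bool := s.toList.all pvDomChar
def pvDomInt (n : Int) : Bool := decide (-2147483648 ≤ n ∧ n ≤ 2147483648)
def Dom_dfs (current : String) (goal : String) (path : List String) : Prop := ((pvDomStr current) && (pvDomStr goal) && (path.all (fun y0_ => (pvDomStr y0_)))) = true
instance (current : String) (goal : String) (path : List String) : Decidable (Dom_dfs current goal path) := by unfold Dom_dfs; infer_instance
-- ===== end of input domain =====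

-- B replaces the recursive DFS by an iterative DFS over an explicit stack of (node, path)
-- frames (alternative decomposition, same cost on this fixed 4-node graph).

-- ===== PORT A =====
def letterA : List String := ["A", "B", "C", "D"]

-- get_moves; when `node` is not in `letter`, Python's letter.index raises ValueError
-- (those inputs are excluded by Pre_dfs; the port returns [] there).
def get_movesA (node : String) : List String :=
  match PySem.List.index? letterA node with
  | none => []
  | some i =>
    let moves : List String := []
    let moves := if i + 1 < letterA.length then moves ++ [letterA.getD (i + 1) ""] else moves
    let moves := if i + 2 < letterA.length then moves ++ [letterA.getD (i + 2) ""] else moves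
    moves

-- the `for move in moves` loop of A, with the recursive call abstracted as `rec`
def tryMovesA (rec : String → List String → Option (List String)) :
    List String → List String → Option (List String)
  | [], _ => none
  | m :: rest, path =>
    if m ∈ path then tryMovesA rec rest path
    else
      let result := rec m (path ++ [m])
      -- Python's `if result:`: truthy = not None and not the empty list
      if (match result with | some l => !l.isEmpty | none => false) then result
      else tryMovesA rec rest path

-- A's recursion, fueled; fuel 5 exceeds the maximal recursion depth on the 4-letter graph
def dfsFuelA : Nat → String → String → List String → Option (List String)
  | 0, _, _, _ => none
  | fuel + 1, current, goal, path =>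
    if current = goal then some path
    else
      let moves := get_movesA current
      if moves.isEmpty then none
      else tryMovesA (fun m p => dfsFuelA fuel m goal p) moves path

def dfs (current : String) (goal : String) (path : List String) : Option (List String) :=
  dfsFuelA 5 current goal path

-- ===== PORT B =====
-- B's while-loop over the stack; the Lean list's HEAD is the END of the Python list
-- (stack.pop() = take the head, stack.append = cons), so `for move in reversed(moves): append`
-- is a foldl over the reversed move list that conses each kept frame.
-- Fuel 16 exceeds the maximal number of loop iterations on the 4-letter graph.
def loopB : Nat → List (String × List String) → String → Option (List String)
  | 0, _, _ => none
  | _ + 1, [], _ => none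
  | fuel + 1, (node, p) :: rest, goal =>
    if node = goal then some p
    else
      let stack := (get_movesA node).reverse.foldl
        (fun st m => if m ∈ p then st else (m, p ++ [m]) :: st) rest
      loopB fuel stack goal

def dfs_alt (current : String) (goal : String) (path : List String) : Option (List String) :=
  loopB 16 [(current, path)] goal

-- ===== PRECONDITION & SPEC =====
-- Pre_ excludes exactly the inputs where current is not a known letter and current ≠ goal:
-- there both A and B raise ValueError (letter.index) and return nothing.
def Pre_dfs (current : String) (goal : String) (path : List String) : Prop :=
  current = goal ∨ current ∈ letterA
instance (current : String) (goal : String) (path : List String) : Decidable (Pre_dfs current goal path) := by unfold Pre_dfs; infer_instance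

def pvWitness_dfs : String × String × List String := ("A", "D", [])

def Spec_dfs (current : String) (goal : String) (path : List String) (out : Option (List String)) : Prop := out = dfs_alt current goal path
instance (current : String) (goal : String) (path : List String) (out : Option (List String)) : Decidable (Spec_dfs current goal path out) := by unfold Spec_dfs; infer_instance

-- ===== CLAIM (what is proved, stated in full; the proofs are below) =====
def Claim_equal_dfs : Prop := ∀ (current : String) (goal : String) (path : List String), Dom_dfs current goal path → Pre_dfs current goal path → Spec_dfs current goal path (dfs current goal path)

-- ===== LEMMAS AND PROOFS =====
lemma gmA : get_movesA "A" = ["B", "C"] := rfl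
lemma gmB : get_movesA "B" = ["C", "D"] := rfl
lemma gmC : get_movesA "C" = ["D"] := rfl
lemma gmD : get_movesA "D" = [] := rfl

-- ===== VERDICT (by name: the statement is the Claim_ definition above) =====
set_option maxHeartbeats 4000000 in
theorem dfs_spec : Claim_equal_dfs := by
  intro current goal path _ hPre
  unfold Spec_dfs dfs dfs_alt
  rcases hPre with h | h
  · subst h; simp [dfsFuelA, loopB]
  · by_cases hg : current = goal
    · subst hg; simp [dfsFuelA, loopB]
    · simp only [letterA, List.mem_cons, List.not_mem_nil, or_false] at h
      rcases h with h | h | h | h <;> subst h <;>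
      by_cases h1 : "B" = goal <;> by_cases h2 : "C" = goal <;> by_cases h3 : "D" = goal <;>
      (try subst h1) <;> (try subst h2) <;> (try subst h3) <;>
      by_cases hB : "B" ∈ path <;> by_cases hC : "C" ∈ path <;> by_cases hD : "D" ∈ path <;>
      simp [dfsFuelA, tryMovesA, loopB, gmA, gmB, gmC, gmD, *]
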